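-- pv_equiv track=rewrite | github.com/ajwillia/home-assistant | homeassistant/components/device_tracker/ddwrt.py | _parse_http_leases
-- ===== SOURCE A (Python) =====
-- def _parse_http_leases(dhcp_leases):
--     """Parse lease data returned by web."""
--     # Remove leading and trailing quotes and spaces
--     cleaned_str = dhcp_leases.replace(
--         "\"", "").replace("\'", "").replace(" ", "")
--     elements = cleaned_str.split(',')
--     num_clients = int(len(elements) / 5)
--     hostname_cache = {}
--     for idx in range(0, num_clients):
--         # The data is a single array
--         # every 5 elements represents one host, the MAC
--         # is the third element and the name is the first.
--         mac_index = (idx * 5) + 2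
--         if mac_index < len(elements):
--             mac = elements[mac_index]
--             hostname_cache[mac] = elements[idx * 5]
--
--     return hostname_cache
-- ===== SOURCE B (Python) =====
-- def _parse_http_leases(dhcp_leases):
--     """Parse lease data returned by web."""
--     cleaned_str = dhcp_leases.replace(
--         "\"", "").replace("\'", "").replace(" ", "")
--     elements = cleaned_str.split(',')
--     # columnar view: keep only whole 5-field records, then pair the MAC
--     # column (field 2 of each record) with the hostname column (field 0)
--     whole = elements[:len(elements) // 5 * 5]
--     return dict(zip(whole[2::5], whole[0::5]))
-- ===== Notes on version B (the rewrite author's own statement) =====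
-- stated objective: alternative
-- what changed: Replaces the counted loop with stride index arithmetic and per-iteration dict insertion by a columnar construction: truncate the split list to whole 5-field records, extract the MAC and hostname columns with extended slices [2::5]/[0::5], and build the dict in one shot with dict(zip(...)).
import Mathlib
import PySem

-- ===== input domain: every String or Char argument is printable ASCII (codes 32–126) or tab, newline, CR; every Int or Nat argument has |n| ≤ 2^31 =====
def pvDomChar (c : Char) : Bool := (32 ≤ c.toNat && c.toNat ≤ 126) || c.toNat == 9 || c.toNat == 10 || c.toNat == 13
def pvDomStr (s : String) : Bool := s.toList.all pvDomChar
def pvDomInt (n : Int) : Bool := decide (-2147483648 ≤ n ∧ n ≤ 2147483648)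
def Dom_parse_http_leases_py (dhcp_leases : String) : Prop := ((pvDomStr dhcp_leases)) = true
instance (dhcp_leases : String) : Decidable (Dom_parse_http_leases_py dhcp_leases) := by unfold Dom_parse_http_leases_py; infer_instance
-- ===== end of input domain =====

-- B replaces A's counted loop with stride index arithmetic by a columnar construction:
-- truncate to whole 5-field records, take the MAC and hostname columns by extended
-- slices [2::5]/[0::5] and build the dict in one shot from the zipped columns (alternative).

-- ===== PORT A =====
def parse_http_leases_py (dhcp_leases : String) : List (String × String) :=
  let cleaned_str := PySem.Str.replace (PySem.Str.replace
      (PySem.Str.replace dhcp_leases "\"" "") "'" "") " " ""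
  -- split(','): sep is the nonempty literal ",", so split? is always some
  let elements := (PySem.Str.split? cleaned_str ",").getD []
  -- int(len(elements) / 5): nonneg truncation = floor division by 5
  let num_clients : Int := ((elements.length / 5 : Nat) : Int)
  let hostname_cache :=
    (PySem.List.pyRange 0 num_clients 1).foldl (fun hc idx =>
      let mac_index := idx * 5 + 2
      if mac_index < (elements.length : Int) then
        -- guarded indexing: mac_index (and idx*5) are in range, pyGetD is exact here
        let mac := PySem.List.pyGetD elements mac_index ""
        hc.insert mac (PySem.List.pyGetD elements (idx * 5) "")
      else hc) (PySem.Dict.empty : PySem.Dict String String)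
  hostname_cache.items

-- ===== PORT B =====
def parse_http_leases_py_alt (dhcp_leases : String) : List (String × String) :=
  let cleaned_str := PySem.Str.replace (PySem.Str.replace
      (PySem.Str.replace dhcp_leases "\"" "") "'" "") " " ""
  let elements := (PySem.Str.split? cleaned_str ",").getD []
  -- whole = elements[:len(elements) // 5 * 5]
  let whole := PySem.List.slice elements none (some ((elements.length / 5 * 5 : Nat) : Int))
  -- dict(zip(whole[2::5], whole[0::5])); dict() of pairs inserts them in order
  let macs := (PySem.List.slice? whole (some 2) none 5).getD []
  let names := (PySem.List.slice? whole (some 0) none 5).getD []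
  ((macs.zip names).foldl (fun hc p => hc.insert p.1 p.2)
      (PySem.Dict.empty : PySem.Dict String String)).items

-- ===== PRECONDITION & SPEC =====
def Spec_parse_http_leases_py (dhcp_leases : String) (out : List (String × String)) : Prop := out = parse_http_leases_py_alt dhcp_leases
instance (dhcp_leases : String) (out : List (String × String)) : Decidable (Spec_parse_http_leases_py dhcp_leases out) := by unfold Spec_parse_http_leases_py; infer_instance

-- ===== CLAIM =====
def Claim_equal_parse_http_leases_py : Prop := ∀ (dhcp_leases : String), Dom_parse_http_leases_py dhcp_leases → Spec_parse_http_leases_py dhcp_leases (parse_http_leases_py dhcp_leases)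

-- ===== LEMMAS AND PROOFS =====

-- extended slice xs[a::5] on a list of length 5*n, for a < 5: the a-th column of the records
theorem pv_stride (xs : List String) (n a : ℕ) (hlen : xs.length = 5 * n) (ha : a < 5) :
    PySem.List.slice? xs (some (a : Int)) none 5
      = some ((List.range n).map fun k => xs.getD (a + 5 * k) "") := by
  simp only [PySem.List.slice?, PySem.List.sliceIndices]
  norm_num
  rcases Nat.eq_zero_or_pos n with hn | hn
  · subst hn
    simp_all
  · rw [if_neg (by omega : ¬ ((a:Int) < 0)), hlen]
    rw [min_eq_left (by exact_mod_cast by omega : (a:Int) ≤ ((5*n:ℕ):Int))]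
    rw [if_pos (by exact_mod_cast by omega : (a:Int) < ((5*n:ℕ):Int))]
    have hcount : ((((5*n:ℕ):Int) - ↑a + 5 - 1) / 5).toNat = n := by
      have h1 : (((5*n:ℕ):Int) - ↑a + 5 - 1) = ((5*n + 4 - a : ℕ) : Int) := by push_cast; omega
      rw [h1, show ((5:Int)) = ((5:ℕ):Int) from rfl, ← Int.natCast_div, Int.toNat_natCast]
      omega
    rw [hcount]
    rw [List.filterMap_congr (g := fun x => some (xs.getD (a + 5 * x) ""))]
    · exact congrFun (List.filterMap_eq_map (f := fun x => xs.getD (a + 5 * x) "")) (List.range n)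
    · intro x hx
      rw [List.mem_range] at hx
      have hidx : ((a:Int) + 5 * (x:ℕ)).toNat = a + 5 * x := by omega
      rw [hidx]
      have hlt : a + 5 * x < xs.length := by omega
      rw [List.getElem?_eq_getElem hlt]
      simp [List.getD, List.getElem?_eq_getElem hlt]
theorem pv_main (es : List String) (d : PySem.Dict String String) :
    (PySem.List.pyRange 0 ((es.length / 5 : Nat) : Int) 1).foldl (fun hc idx =>
        let mac_index := idx * 5 + 2
        if mac_index < (es.length : Int) then
          let mac := PySem.List.pyGetD es mac_index ""
          hc.insert mac (PySem.List.pyGetD es (idx * 5) "")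
        else hc) d
    = (let whole := PySem.List.slice es none (some ((es.length / 5 * 5 : Nat) : Int))
       let macs := (PySem.List.slice? whole (some 2) none 5).getD []
       let names := (PySem.List.slice? whole (some 0) none 5).getD []
       (macs.zip names).foldl (fun hc p => hc.insert p.1 p.2) d) := by
  set n := es.length / 5 with hn
  have hwl : (PySem.List.slice es none (some ((n * 5 : Nat) : Int))).length = 5 * n := by
    rw [PySem.List.slice_to_natCast, List.length_take]
    omega
  simp only []
  conv_rhs => rw [show ((2:Int)) = ((2:ℕ):Int) by norm_num, show ((0:Int)) = ((0:ℕ):Int) by norm_num]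
  rw [pv_stride _ n 2 hwl (by omega), pv_stride _ n 0 hwl (by omega)]
  simp only [Option.getD_some, List.zip_map', List.foldl_map]
  rw [PySem.List.pyRange_zero_natCast, List.foldl_map]
  apply PySem.List.foldl_congr_mem
  intro acc k hk
  rw [List.mem_range] at hk
  have h5 : 5 * k + 5 ≤ es.length := by omega
  rw [if_pos (by omega)]
  have e1 : ((k:ℕ):Int) * 5 + 2 = ((5 * k + 2 : ℕ) : Int) := by push_cast; ring
  have e2 : ((k:ℕ):Int) * 5 = ((5 * k : ℕ) : Int) := by push_cast; ring
  rw [e1, e2, PySem.List.pyGetD_natCast, PySem.List.pyGetD_natCast]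
  have hget : ∀ i, i < n * 5 →
      (PySem.List.slice es none (some ((n * 5 : Nat) : Int))).getD i "" = es.getD i "" := by
    intro i hi
    rw [PySem.List.slice_to_natCast]
    simp [List.getD, hi]
  rw [hget (2 + 5 * k) (by omega), hget (0 + 5 * k) (by omega)]
  norm_num [Nat.add_comm]

-- ===== VERDICT =====
theorem parse_http_leases_py_spec : Claim_equal_parse_http_leases_py := by
  intro s _
  show parse_http_leases_py s = parse_http_leases_py_alt s
  simp only [parse_http_leases_py, parse_http_leases_py_alt]
  rw [pv_main]
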